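-- pv_equiv track=rewrite | github.com/zofialuther/CS8395-08-Paper1-updated | data/translated-code/pseudo-to-python/prolog/Soundex.py | consonants
-- ===== SOURCE A (Python) =====
-- def creplace(Ch, result):
--     if Ch in "bfpv":
--         return result.replace(Ch, '1')
--     elif Ch in "cgjkqsxz":
--         return result.replace(Ch, '2')
--     elif Ch in "dt":
--         return result.replace(Ch, '3')
--     elif Ch == 'l':
--         return result.replace(Ch, '4')
--     elif Ch in "mn":
--         return result.replace(Ch, '5')
--     elif Ch == 'r':
--         return result.replace(Ch, '6')
--
-- def consonants(T, Tr):
--     if T: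
--         H = T[0]
--         T = T[1:]
--         result = creplace(H, H)
--         Tr.append(result)
--         return consonants(T, Tr)
--     else:
--         return Tr
-- ===== SOURCE B (Python) =====
-- # B: table-driven — one precomputed char->digit dict replaces creplace's branch
-- # chain, and an explicit loop (appending into Tr, which is mutated like in A)
-- # replaces the tail recursion.
-- _CODES = {'b': '1', 'f': '1', 'p': '1', 'v': '1',
--           'c': '2', 'g': '2', 'j': '2', 'k': '2', 'q': '2', 's': '2', 'x': '2', 'z': '2',
--           'd': '3', 't': '3',
--           'l': '4',
--           'm': '5', 'n': '5',
--           'r': '6'}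
--
-- def consonants(T, Tr):
--     for H in T:
--         Tr.append(_CODES.get(H))
--     return Tr
-- ===== Notes on version B (the rewrite author's own statement) =====
-- stated objective: simpler
-- what changed: Replaced the per-character six-branch creplace chain (membership test + str.replace) by one precomputed char-to-digit dict looked up with .get, and the tail recursion over the string by a single for loop appending into Tr.
import Mathlib
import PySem

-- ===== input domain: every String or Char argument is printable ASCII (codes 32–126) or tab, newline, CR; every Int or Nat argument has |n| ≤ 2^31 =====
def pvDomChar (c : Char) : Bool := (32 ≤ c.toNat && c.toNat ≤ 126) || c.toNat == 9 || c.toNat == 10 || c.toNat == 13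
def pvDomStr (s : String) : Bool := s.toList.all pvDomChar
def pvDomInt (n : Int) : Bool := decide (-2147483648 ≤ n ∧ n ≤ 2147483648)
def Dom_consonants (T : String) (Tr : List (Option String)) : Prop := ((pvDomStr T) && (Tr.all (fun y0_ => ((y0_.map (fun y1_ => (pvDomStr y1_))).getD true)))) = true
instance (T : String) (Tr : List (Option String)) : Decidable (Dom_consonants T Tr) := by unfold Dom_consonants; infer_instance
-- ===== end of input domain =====

-- B replaces creplace's six-branch chain by a single precomputed char→digit
-- lookup table and the tail recursion by one loop (objective: simpler). Both A
-- and B mutate Tr in place by appending; the theorems are about the return value.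

-- ===== PORT A =====
def creplace (Ch result : String) : Option String :=
  if PySem.Str.isIn Ch "bfpv" then some (PySem.Str.replace result Ch "1")
  else if PySem.Str.isIn Ch "cgjkqsxz" then some (PySem.Str.replace result Ch "2")
  else if PySem.Str.isIn Ch "dt" then some (PySem.Str.replace result Ch "3")
  else if Ch = "l" then some (PySem.Str.replace result Ch "4")
  else if PySem.Str.isIn Ch "mn" then some (PySem.Str.replace result Ch "5")
  else if Ch = "r" then some (PySem.Str.replace result Ch "6")
  else none

def consonantsGo : List Char → List (Option String) → List (Option String)
  | [], Tr => Tr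
  | c :: t, Tr => consonantsGo t (Tr ++ [creplace (String.ofList [c]) (String.ofList [c])])

def consonants (T : String) (Tr : List (Option String)) : List (Option String) :=
  consonantsGo T.toList Tr

-- ===== PORT B =====
def codesB : PySem.Dict Char String :=
  PySem.Dict.ofList [('b', "1"), ('f', "1"), ('p', "1"), ('v', "1"),
    ('c', "2"), ('g', "2"), ('j', "2"), ('k', "2"), ('q', "2"), ('s', "2"), ('x', "2"), ('z', "2"),
    ('d', "3"), ('t', "3"), ('l', "4"), ('m', "5"), ('n', "5"), ('r', "6")]

def consonants_alt (T : String) (Tr : List (Option String)) : List (Option String) :=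
  T.toList.foldl (fun acc c => acc ++ [codesB.get? c]) Tr

-- ===== PRECONDITION & SPEC =====
def Spec_consonants (T : String) (Tr : List (Option String)) (out : List (Option String)) : Prop := out = consonants_alt T Tr
instance (T : String) (Tr : List (Option String)) (out : List (Option String)) : Decidable (Spec_consonants T Tr out) := by unfold Spec_consonants; infer_instance

-- ===== CLAIM (what is proved, stated in full; the proofs are below) =====
def Claim_equal_consonants : Prop := ∀ (T : String) (Tr : List (Option String)), Dom_consonants T Tr → Spec_consonants T Tr (consonants T Tr)

-- ===== LEMMAS AND PROOFS =====
theorem isIn_singleton (c : Char) (l : List Char) :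
    PySem.Chars.isIn [c] l = l.contains c := by
  by_cases h : c ∈ l
  · rw [(PySem.Chars.isIn_iff_infix _ _).mpr ((List.singleton_infix_iff c l).mpr h)]
    simp [h]
  · rw [(PySem.Chars.isIn_eq_false_iff _ _).mpr (by simp [List.singleton_infix_iff, h])]
    simp [h]

set_option maxHeartbeats 1000000 in
theorem codesB_eq : codesB = PySem.Dict.mk [('b', "1"), ('f', "1"), ('p', "1"), ('v', "1"),
    ('c', "2"), ('g', "2"), ('j', "2"), ('k', "2"), ('q', "2"), ('s', "2"), ('x', "2"), ('z', "2"),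
    ('d', "3"), ('t', "3"), ('l', "4"), ('m', "5"), ('n', "5"), ('r', "6")] := by decide

theorem codesB_get_none (c : Char)
    (h : c ∉ (['b','f','p','v','c','g','j','k','q','s','x','z','d','t','l','m','n','r'] : List Char)) :
    codesB.get? c = none := by
  simp only [List.mem_cons, not_or] at h
  obtain ⟨h1,h2,h3,h4,h5,h6,h7,h8,h9,h10,h11,h12,h13,h14,h15,h16,h17,h18,-⟩ := h
  rw [codesB_eq]
  simp only [PySem.Dict.get?, List.find?]
  simp [beq_eq_false_iff_ne.mpr (Ne.symm h1), beq_eq_false_iff_ne.mpr (Ne.symm h2), beq_eq_false_iff_ne.mpr (Ne.symm h3), beq_eq_false_iff_ne.mpr (Ne.symm h4), beq_eq_false_iff_ne.mpr (Ne.symm h5), beq_eq_false_iff_ne.mpr (Ne.symm h6), beq_eq_false_iff_ne.mpr (Ne.symm h7), beq_eq_false_iff_ne.mpr (Ne.symm h8), beq_eq_false_iff_ne.mpr (Ne.symm h9), beq_eq_false_iff_ne.mpr (Ne.symm h10), beq_eq_false_iff_ne.mpr (Ne.symm h11), beq_eq_false_iff_ne.mpr (Ne.symm h12), beq_eq_false_iff_ne.mpr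 (Ne.symm h13), beq_eq_false_iff_ne.mpr (Ne.symm h14), beq_eq_false_iff_ne.mpr (Ne.symm h15), beq_eq_false_iff_ne.mpr (Ne.symm h16), beq_eq_false_iff_ne.mpr (Ne.symm h17), beq_eq_false_iff_ne.mpr (Ne.symm h18)]

set_option maxHeartbeats 1000000 in
theorem creplace_eq_get (c : Char) :
    creplace (String.ofList [c]) (String.ofList [c]) = codesB.get? c := by
  by_cases hm : c ∈ (['b','f','p','v','c','g','j','k','q','s','x','z','d','t','l','m','n','r'] : List Char)
  · fin_cases hm <;> decide
  · rw [codesB_get_none c hm]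
    simp only [List.mem_cons, not_or] at hm
    obtain ⟨h1,h2,h3,h4,h5,h6,h7,h8,h9,h10,h11,h12,h13,h14,h15,h16,h17,h18,-⟩ := hm
    have hl : String.ofList [c] ≠ "l" := by
      intro he; exact h15 (by simpa using congrArg String.toList he)
    have hr : String.ofList [c] ≠ "r" := by
      intro he; exact h18 (by simpa using congrArg String.toList he)
    simp [creplace, isIn_singleton, hl, hr,
      h1, h2, h3, h4, h5, h6, h7, h8, h9, h10, h11, h12, h13, h14, h16, h17]

theorem go_eq_foldl (l : List Char) (Tr : List (Option String)) :
    consonantsGo l Tr = l.foldl (fun acc c => acc ++ [codesB.get? c]) Tr := by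
  induction l generalizing Tr with
  | nil => rfl
  | cons c t ih => simp [consonantsGo, creplace_eq_get, ih]

-- ===== VERDICT (by name: the statement is the Claim_ definition above) =====
theorem consonants_spec : Claim_equal_consonants := by
  intro T Tr _
  unfold Spec_consonants consonants consonants_alt
  exact go_eq_foldl T.toList Tr
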